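-- pv_equiv track=rewrite | github.com/hyuuny/backjoon-algorithm | 백준/Silver/9037. The candy war/The candy war.py | teacher
-- ===== SOURCE A (Python) =====
-- def teacher(n, candy):
--     tmps = [0 for _ in range(n)]
--     for idx in range(n):
--         if candy[idx] % 2:
--             candy[idx] += 1
--         candy[idx] //= 2
--         tmps[(idx + 1) % n] = candy[idx]
--
--     for idx in range(n):
--         candy[idx] += tmps[idx]
--
--     return candy
-- ===== SOURCE B (Python) =====
-- def teacher(n, candy):
--     # Single pass carrying the previous child's half (ceil division); mutates candy in place like A.
--     if n <= 0:
--         return candy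
--     prev = -(-candy[n - 1] // 2)
--     for i in range(n):
--         cur = -(-candy[i] // 2)
--         candy[i] = cur + prev
--         prev = cur
--     return candy
-- ===== Notes on version B (the rewrite author's own statement) =====
-- stated objective: simpler
-- what changed: B replaces A's two passes and auxiliary tmps array (halve everyone, then add the stored neighbour halves) with a single pass that carries the previous child's half in one scalar, using ceiling division -(-c//2) instead of A's odd-adjust-then-floor.
import Mathlib
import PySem

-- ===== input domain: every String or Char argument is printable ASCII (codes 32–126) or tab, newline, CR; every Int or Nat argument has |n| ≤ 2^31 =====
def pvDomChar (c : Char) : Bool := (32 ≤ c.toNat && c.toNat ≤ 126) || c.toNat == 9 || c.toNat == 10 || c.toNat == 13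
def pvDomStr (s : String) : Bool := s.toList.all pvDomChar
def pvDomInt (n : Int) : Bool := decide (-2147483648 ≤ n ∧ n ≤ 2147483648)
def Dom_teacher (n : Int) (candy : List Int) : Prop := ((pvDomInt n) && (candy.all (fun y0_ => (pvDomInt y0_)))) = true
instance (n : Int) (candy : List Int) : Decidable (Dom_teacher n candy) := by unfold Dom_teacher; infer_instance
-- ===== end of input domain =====

-- B does one pass with a carried scalar instead of A's two passes plus tmps array (objective: simpler).
-- Both Pythons mutate candy in place (to the same final contents); the theorems are about the return value.

-- ===== PORT A =====
def teacher (n : Int) (candy : List Int) : List Int :=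
  let tmps : List Int := List.replicate n.toNat 0
  let st := (PySem.List.pyRange 0 n 1).foldl
    (fun (st : List Int × List Int) idx =>
      let c := PySem.List.pyGetD st.1 idx 0
      let c := if PySem.Int.mod c 2 ≠ 0 then c + 1 else c
      let c := PySem.Int.floordiv c 2
      (PySem.List.pySetD st.1 idx c,
       PySem.List.pySetD st.2 (PySem.Int.mod (idx + 1) n) c))
    (candy, tmps)
  (PySem.List.pyRange 0 n 1).foldl
    (fun cs idx =>
      PySem.List.pySetD cs idx (PySem.List.pyGetD cs idx 0 + PySem.List.pyGetD st.2 idx 0))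
    st.1

-- ===== PORT B =====
def teacher_alt (n : Int) (candy : List Int) : List Int :=
  if n ≤ 0 then candy
  else
    let prev0 := -(PySem.Int.floordiv (-(PySem.List.pyGetD candy (n - 1) 0)) 2)
    ((PySem.List.pyRange 0 n 1).foldl
      (fun (st : List Int × Int) i =>
        let cur := -(PySem.Int.floordiv (-(PySem.List.pyGetD st.1 i 0)) 2)
        (PySem.List.pySetD st.1 i (cur + st.2), cur))
      (candy, prev0)).1

-- ===== PRECONDITION & SPEC =====
-- Pre_ excludes exactly the inputs where Python A raises IndexError: n exceeding len(candy) (B raises there too).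
def Pre_teacher (n : Int) (candy : List Int) : Prop := n ≤ (candy.length : Int)
instance (n : Int) (candy : List Int) : Decidable (Pre_teacher n candy) := by unfold Pre_teacher; infer_instance
def pvWitness_teacher : Int × List Int := (3, [5, 2, 7])

def Spec_teacher (n : Int) (candy : List Int) (out : List Int) : Prop := out = teacher_alt n candy
instance (n : Int) (candy : List Int) (out : List Int) : Decidable (Spec_teacher n candy out) := by unfold Spec_teacher; infer_instance

-- ===== CLAIM (what is proved, stated in full; the proofs are below) =====
def Claim_equal_teacher : Prop := ∀ (n : Int) (candy : List Int), Dom_teacher n candy → Pre_teacher n candy → Spec_teacher n candy (teacher n candy)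

-- ===== LEMMAS AND PROOFS =====

-- half as B computes it: ceiling division by 2
def hv (c : Int) : Int := -(PySem.Int.floordiv (-c) 2)

-- A's halving (odd-adjust then floor) equals B's ceiling division
theorem hvA_eq (c : Int) :
    PySem.Int.floordiv (if PySem.Int.mod c 2 ≠ 0 then c + 1 else c) 2 = hv c := by
  unfold hv
  simp only [PySem.Int.floordiv_eq_ediv_of_pos (by norm_num : (0:Int) < 2),
    PySem.Int.mod_eq_emod_of_pos (by norm_num : (0:Int) < 2)]
  split_ifs <;> omega

-- the half carried into position k by B's single pass (= A's tmps[k])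
def prevF (c : List Int) (m k : Nat) : Int :=
  if k = 0 then hv (c.getD (m - 1) 0) else hv (c.getD (k - 1) 0)

-- candy after the first k steps of A's first loop
def Cfun (c : List Int) (k : Nat) : List Int := (c.take k).map hv ++ c.drop k
-- tmps after the first k steps of A's first loop (k ≤ m; at k = m slot 0 is overwritten)
def Tfun (c : List Int) (m k : Nat) : List Int :=
  if k < m then 0 :: ((c.take k).map hv ++ List.replicate (m - 1 - k) 0)
  else hv (c.getD (m - 1) 0) :: (c.take (m - 1)).map hv
-- the common final answer on the first m positions
def Zfun (c : List Int) (m : Nat) : List Int :=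
  List.zipWith (· + ·) ((c.take m).map hv) (Tfun c m m)
-- candy after the first k steps of A's second loop
def S2A (c : List Int) (m k : Nat) : List Int := (Zfun c m).take k ++ (Cfun c m).drop k
-- candy after the first k steps of B's loop
def S2B (c : List Int) (m k : Nat) : List Int := (Zfun c m).take k ++ c.drop k

theorem foldl_range_inv {σ : Type} {f : σ → Nat → σ} {S : Nat → σ} {init : σ} {k : Nat}
    (hinit : init = S 0) (h : ∀ j, j < k → f (S j) j = S (j + 1)) :
    (List.range k).foldl f init = S k := by
  subst hinit
  induction k with
  | zero => simp
  | succ k ih =>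
    rw [List.range_succ, List.foldl_append, ih (fun j hj => h j (by omega))]
    simpa using h k (by omega)

theorem len_Cfun (c : List Int) (k : Nat) (hk : k ≤ c.length) : (Cfun c k).length = c.length := by
  unfold Cfun
  rw [List.length_append, List.length_map, List.length_take, List.length_drop]
  omega

theorem getElem_Cfun (c : List Int) (k i : Nat) (hk : k ≤ c.length) (hi : i < c.length)
    (h : i < (Cfun c k).length) :
    (Cfun c k)[i] = if i < k then hv (c.getD i 0) else c.getD i 0 := by
  unfold Cfun
  rw [List.getElem_append]
  split_ifs with h1 h2 h3
  · rw [List.getElem_map, List.getElem_take, List.getD_eq_getElem c 0 hi]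
  · simp at h1; omega
  · simp at h1; omega
  · rw [List.getElem_drop, List.getD_eq_getElem c 0 hi]
    congr 1; simp; omega
theorem len_Tfun (c : List Int) (m k : Nat) (hm0 : 0 < m) (hk : k ≤ m) (hm : m ≤ c.length) :
    (Tfun c m k).length = m := by
  unfold Tfun
  split_ifs with h1
  · rw [List.length_cons, List.length_append, List.length_map, List.length_take,
      List.length_replicate, Nat.min_eq_left (by omega)]
    omega
  · rw [List.length_cons, List.length_map, List.length_take, Nat.min_eq_left (by omega)]
    omega

theorem getElem_Tfun (c : List Int) (m k i : Nat) (hk : k ≤ m) (hm : m ≤ c.length) (hm0 : 0 < m)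
    (hi : i < m) (h : i < (Tfun c m k).length) :
    (Tfun c m k)[i] =
      if i = 0 then (if k = m then hv (c.getD (m - 1) 0) else 0)
      else if i ≤ k then hv (c.getD (i - 1) 0) else 0 := by
  rcases Nat.eq_zero_or_pos i with hi0 | hi0
  · subst hi0
    unfold Tfun at h ⊢
    by_cases h1 : k < m
    · simp only [if_pos h1] at h ⊢
      simp [show ¬ k = m by omega]
    · simp only [if_neg h1] at h ⊢
      simp [show k = m by omega]
  · obtain ⟨i', rfl⟩ : ∃ i', i = i' + 1 := ⟨i - 1, by omega⟩
    rw [if_neg (by omega : ¬ i' + 1 = 0)]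
    simp only [Nat.add_sub_cancel]
    unfold Tfun at h ⊢
    by_cases h1 : k < m
    · simp only [if_pos h1] at h ⊢
      rw [List.getElem_cons_succ]
      by_cases h2 : i' < k
      · rw [if_pos (by omega : i' + 1 ≤ k)]
        rw [List.getElem_append_left (by rw [List.length_map, List.length_take]; omega)]
        rw [List.getElem_map, List.getElem_take]
        exact congrArg hv (List.getD_eq_getElem c 0 (by omega)).symm
      · rw [if_neg (by omega : ¬ i' + 1 ≤ k)]
        rw [List.getElem_append_right (by rw [List.length_map, List.length_take]; omega)]
        rw [List.getElem_replicate]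
    · simp only [if_neg h1] at h ⊢
      rw [if_pos (by omega : i' + 1 ≤ k)]
      rw [List.getElem_cons_succ, List.getElem_map, List.getElem_take]
      exact congrArg hv (List.getD_eq_getElem c 0 (by omega)).symm
theorem len_Zfun (c : List Int) (m : Nat) (hm0 : 0 < m) (hm : m ≤ c.length) :
    (Zfun c m).length = m := by
  unfold Zfun
  rw [List.length_zipWith, List.length_map, List.length_take,
    len_Tfun c m m hm0 le_rfl hm]
  omega

theorem getElem_Zfun (c : List Int) (m i : Nat) (hm0 : 0 < m) (hm : m ≤ c.length)
    (hi : i < m) (h : i < (Zfun c m).length) :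
    (Zfun c m)[i] = hv (c.getD i 0) + prevF c m i := by
  unfold Zfun
  rw [List.getElem_zipWith, List.getElem_map, List.getElem_take,
    getElem_Tfun c m m i le_rfl hm hm0 hi]
  unfold prevF
  by_cases hi0 : i = 0
  · rw [if_pos hi0, if_pos hi0, if_pos rfl]
    exact congrArg (· + _) (congrArg hv (List.getD_eq_getElem c 0 (by omega)).symm)
  · rw [if_neg hi0, if_neg hi0, if_pos (by omega : i ≤ m)]
    exact congrArg (· + _) (congrArg hv (List.getD_eq_getElem c 0 (by omega)).symm)

theorem prevF_succ (c : List Int) (m j : Nat) : prevF c m (j + 1) = hv (c.getD j 0) := by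
  unfold prevF
  rw [if_neg (Nat.succ_ne_zero j), Nat.add_sub_cancel]

-- getD reads used by the loop steps
theorem getD_Cfun_self (c : List Int) (m j : Nat) (hj : j < m) (hm : m ≤ c.length) :
    (Cfun c j).getD j 0 = c.getD j 0 := by
  unfold Cfun
  rw [List.getD_append_right _ _ _ _ (by rw [List.length_map, List.length_take]; omega)]
  rw [List.length_map, List.length_take, Nat.min_eq_left (by omega), Nat.sub_self]
  rw [List.getD_eq_getElem?_getD, List.getD_eq_getElem?_getD, List.getElem?_drop, Nat.add_zero]

theorem getD_Tfun_prev (c : List Int) (m j : Nat) (hm0 : 0 < m) (hj : j < m)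
    (hm : m ≤ c.length) :
    (Tfun c m m).getD j 0 = prevF c m j := by
  rw [List.getD_eq_getElem _ _ (by rw [len_Tfun c m m hm0 le_rfl hm]; omega)]
  rw [getElem_Tfun c m m j le_rfl hm hm0 hj]
  unfold prevF
  by_cases hj0 : j = 0
  · rw [if_pos hj0, if_pos hj0, if_pos rfl]
  · rw [if_neg hj0, if_neg hj0, if_pos (by omega : j ≤ m)]

theorem getD_S2A_self (c : List Int) (m j : Nat) (hm0 : 0 < m) (hj : j < m)
    (hm : m ≤ c.length) :
    (S2A c m j).getD j 0 = hv (c.getD j 0) := by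
  unfold S2A
  rw [List.getD_append_right _ _ _ _ (by rw [List.length_take, len_Zfun c m hm0 hm]; omega)]
  rw [List.length_take, len_Zfun c m hm0 hm, Nat.min_eq_left (by omega), Nat.sub_self]
  rw [List.getD_eq_getElem?_getD, List.getElem?_drop, Nat.add_zero,
    List.getElem?_eq_getElem (by rw [len_Cfun c m hm]; omega), Option.getD_some]
  rw [getElem_Cfun c m j hm (by omega), if_pos hj]

theorem getD_S2B_self (c : List Int) (m j : Nat) (hm0 : 0 < m) (hj : j < m)
    (hm : m ≤ c.length) :
    (S2B c m j).getD j 0 = c.getD j 0 := by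
  unfold S2B
  rw [List.getD_append_right _ _ _ _ (by rw [List.length_take, len_Zfun c m hm0 hm]; omega)]
  rw [List.length_take, len_Zfun c m hm0 hm, Nat.min_eq_left (by omega), Nat.sub_self]
  rw [List.getD_eq_getElem?_getD, List.getD_eq_getElem?_getD, List.getElem?_drop, Nat.add_zero]

-- the four set steps
theorem step1_C (c : List Int) (m j : Nat) (hj : j < m) (hm : m ≤ c.length) :
    (Cfun c j).set j (hv (c.getD j 0)) = Cfun c (j + 1) := by
  unfold Cfun
  have h1 : ((c.take j).map hv).length = j := by
    rw [List.length_map, List.length_take]; omega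
  rw [List.set_append, h1, if_neg (lt_irrefl j), Nat.sub_self]
  rw [List.drop_eq_getElem_cons (by omega : j < c.length), List.set_cons_zero]
  rw [List.take_succ, List.getElem?_eq_getElem (by omega : j < c.length)]
  rw [List.getD_eq_getElem c 0 (by omega : j < c.length)]
  simp only [Option.toList_some, List.map_append, List.map_cons, List.map_nil,
    List.append_assoc, List.singleton_append, List.map_take]

theorem step1_T (c : List Int) (m j : Nat) (hm0 : 0 < m) (hj : j < m) (hm : m ≤ c.length) :
    (Tfun c m j).set ((j + 1) % m) (hv (c.getD j 0)) = Tfun c m (j + 1) := by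
  unfold Tfun
  rw [if_pos hj]
  have h1 : ((c.take j).map hv).length = j := by
    rw [List.length_map, List.length_take]; omega
  by_cases hj1 : j + 1 < m
  · rw [Nat.mod_eq_of_lt hj1, if_pos hj1, List.set_cons_succ]
    rw [List.set_append, h1, if_neg (lt_irrefl j), Nat.sub_self]
    rw [show m - 1 - j = (m - 1 - (j + 1)) + 1 by omega, List.replicate_succ,
      List.set_cons_zero]
    rw [List.take_succ, List.getElem?_eq_getElem (by omega : j < c.length)]
    rw [List.getD_eq_getElem c 0 (by omega : j < c.length)]
    simp only [Option.toList_some, List.map_append, List.map_cons, List.map_nil,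
      List.append_assoc, List.singleton_append, List.map_take]
  · have hjm : j = m - 1 := by omega
    rw [show j + 1 = m by omega, Nat.mod_self, List.set_cons_zero,
      if_neg (by omega : ¬ m < m)]
    rw [show m - 1 - j = 0 by omega, List.replicate_zero, List.append_nil, hjm]

theorem step2_set (c : List Int) (m j : Nat) (hm0 : 0 < m) (hj : j < m) (hm : m ≤ c.length) :
    (S2A c m j).set j (hv (c.getD j 0) + prevF c m j) = S2A c m (j + 1) := by
  unfold S2A
  have h1 : ((Zfun c m).take j).length = j := by
    rw [List.length_take, len_Zfun c m hm0 hm]; omega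
  rw [List.set_append, h1, if_neg (lt_irrefl j), Nat.sub_self]
  rw [List.drop_eq_getElem_cons (by rw [len_Cfun c m hm]; omega), List.set_cons_zero]
  rw [List.take_succ, List.getElem?_eq_getElem (by rw [len_Zfun c m hm0 hm]; omega)]
  rw [getElem_Zfun c m j hm0 hm hj]
  simp [List.append_assoc]

theorem stepB_set (c : List Int) (m j : Nat) (hm0 : 0 < m) (hj : j < m) (hm : m ≤ c.length) :
    (S2B c m j).set j (hv (c.getD j 0) + prevF c m j) = S2B c m (j + 1) := by
  unfold S2B
  have h1 : ((Zfun c m).take j).length = j := by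
    rw [List.length_take, len_Zfun c m hm0 hm]; omega
  rw [List.set_append, h1, if_neg (lt_irrefl j), Nat.sub_self]
  rw [List.drop_eq_getElem_cons (by omega : j < c.length), List.set_cons_zero]
  rw [List.take_succ, List.getElem?_eq_getElem (by rw [len_Zfun c m hm0 hm]; omega)]
  rw [getElem_Zfun c m j hm0 hm hj]
  simp [List.append_assoc]

-- initial and final states
theorem Cfun_zero (c : List Int) : Cfun c 0 = c := by
  unfold Cfun; simp

theorem Tfun_zero (c : List Int) (m : Nat) (hm0 : 0 < m) :
    Tfun c m 0 = List.replicate m 0 := by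
  unfold Tfun
  rw [if_pos hm0]
  rw [show m = (m - 1) + 1 by omega, List.replicate_succ]
  simp

theorem S2A_zero (c : List Int) (m : Nat) : S2A c m 0 = Cfun c m := by
  unfold S2A; simp

theorem S2B_zero (c : List Int) (m : Nat) : S2B c m 0 = c := by
  unfold S2B; simp

theorem S2A_final (c : List Int) (m : Nat) (hm : m ≤ c.length) : S2A c m m = S2B c m m := by
  unfold S2A S2B Cfun
  rw [List.drop_left' (by rw [List.length_map, List.length_take]; omega)]
-- ===== VERDICT (by name: the statement is the Claim_ definition above) =====
theorem teacher_spec : Claim_equal_teacher := by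
  intro n candy _hDom hPre
  unfold Spec_teacher
  by_cases hn : n ≤ 0
  · unfold teacher teacher_alt
    rw [PySem.List.pyRange_one_eq_nil hn, if_pos hn]
    rfl
  · have hn0 : 0 < n := by omega
    obtain ⟨m, rfl⟩ : ∃ m : Nat, n = (m : Int) := ⟨n.toNat, (Int.toNat_of_nonneg (by omega)).symm⟩
    have hm0 : 0 < m := by exact_mod_cast hn0
    have hm : m ≤ candy.length := by
      unfold Pre_teacher at hPre
      exact_mod_cast hPre
    unfold teacher teacher_alt
    rw [if_neg hn, Int.toNat_natCast, PySem.List.pyRange_zero_natCast]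
    simp only [List.foldl_map]
    rw [foldl_range_inv (S := fun k => (Cfun candy k, Tfun candy m k))
        (by dsimp only; rw [Cfun_zero, Tfun_zero candy m hm0]) ?s1]
    case s1 =>
      intro j hj
      dsimp only
      rw [PySem.List.pyGetD_natCast, getD_Cfun_self candy m j hj hm, hvA_eq]
      rw [show ((j : Int) + 1) = (((j + 1 : Nat)) : Int) by push_cast; ring,
        PySem.Int.mod_natCast, PySem.List.pySetD_natCast, PySem.List.pySetD_natCast]
      rw [step1_C candy m j hj hm, step1_T candy m j hm0 hj hm]
    dsimp only
    rw [foldl_range_inv (S := fun k => S2A candy m k) (by dsimp only; rw [S2A_zero]) ?s2]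
    case s2 =>
      intro j hj
      dsimp only
      rw [PySem.List.pyGetD_natCast, PySem.List.pyGetD_natCast, PySem.List.pySetD_natCast]
      rw [getD_S2A_self candy m j hm0 hj hm, getD_Tfun_prev candy m j hm0 hj hm]
      exact step2_set candy m j hm0 hj hm
    rw [foldl_range_inv (S := fun k => (S2B candy m k, prevF candy m k)) ?iB ?sB]
    case iB =>
      dsimp only
      rw [show ((m : Int) - 1) = (((m - 1 : Nat)) : Int) by omega, PySem.List.pyGetD_natCast]
      rw [S2B_zero]
      unfold prevF
      rw [if_pos rfl]
      rfl
    case sB =>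
      intro j hj
      dsimp only
      rw [PySem.List.pyGetD_natCast, PySem.List.pySetD_natCast,
        getD_S2B_self candy m j hm0 hj hm]
      rw [show -(PySem.Int.floordiv (-(candy.getD j 0)) 2) = hv (candy.getD j 0) from rfl]
      rw [stepB_set candy m j hm0 hj hm, prevF_succ candy m j]
    dsimp only
    exact S2A_final candy m hm
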